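-- pv_equiv track=rewrite | github.com/bond-lab/namae-bc | web/filters.py | multisort_filter
-- ===== SOURCE A (Python) =====
-- def multisort_filter(items, sort_spec):
--     """Sort items by multiple columns with signed direction.
--
--     Args:
--         items: List of tuples to sort
--         sort_spec: List of column numbers (1-indexed), negative for reverse
--                    e.g., [3, -2] sorts by col 3 ascending, then col 2 descending
--     """
--     if not sort_spec:
--         return items
--
--     result = list(items)
--     for col_spec in reversed(sort_spec):
--         reverse = col_spec < 0
--         idx = abs(col_spec)
--         result = sorted(result, key=lambda x: x[idx], reverse=reverse)
--
--     return result
-- ===== SOURCE B (Python) =====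
-- from functools import cmp_to_key
--
-- def multisort_filter(items, sort_spec):
--     """Sort items by multiple columns with signed direction (single comparator sort)."""
--     if not sort_spec:
--         return items
--
--     def compare(x, y):
--         for col_spec in sort_spec:
--             idx = abs(col_spec)
--             a = x[idx]
--             b = y[idx]
--             if a < b:
--                 return 1 if col_spec < 0 else -1
--             if b < a:
--                 return -1 if col_spec < 0 else 1
--         return 0
--
--     return sorted(items, key=cmp_to_key(compare))
-- ===== Notes on version B (the rewrite author's own statement) =====
-- stated objective: idiomatic
-- what changed: A runs k successive stable single-column sorts over reversed(sort_spec); B does one stable sort with a single lexicographic comparator built via functools.cmp_to_key.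
import Mathlib
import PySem

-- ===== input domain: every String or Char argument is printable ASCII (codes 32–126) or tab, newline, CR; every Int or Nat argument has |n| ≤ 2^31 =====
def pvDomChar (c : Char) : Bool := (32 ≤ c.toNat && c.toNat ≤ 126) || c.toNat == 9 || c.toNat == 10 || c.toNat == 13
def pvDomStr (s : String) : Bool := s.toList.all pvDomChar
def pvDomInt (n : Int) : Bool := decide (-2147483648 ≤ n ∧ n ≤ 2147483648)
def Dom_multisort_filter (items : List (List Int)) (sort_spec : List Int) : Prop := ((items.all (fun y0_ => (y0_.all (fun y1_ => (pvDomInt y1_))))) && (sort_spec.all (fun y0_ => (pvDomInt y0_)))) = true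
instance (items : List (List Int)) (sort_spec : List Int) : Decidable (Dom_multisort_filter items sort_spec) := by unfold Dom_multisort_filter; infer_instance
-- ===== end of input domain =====

-- B replaces A's k stable sorting passes by ONE stable sort with a lexicographic comparator (functools.cmp_to_key); same return value on Pre_ (idiomatic alternative, no speed claim).

-- ===== PORT A =====
-- x[idx] in the key lambda is ported as pyGetD (default 0); Pre_ keeps every index in range, where this is exact.
def multisort_filter (items : List (List Int)) (sort_spec : List Int) : List (List Int) :=
  if sort_spec = [] then items
  else
    sort_spec.reverse.foldl
      (fun result col_spec =>
        PySem.List.sorted result (fun x => PySem.List.pyGetD x (col_spec.natAbs : Int) 0)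
          (decide (col_spec < 0)))
      items

-- ===== PORT B =====
-- the comparator `compare` of Source B: forward loop over sort_spec, first non-tie column decides
def cmpCols (sort_spec : List Int) (x y : List Int) : Int :=
  match sort_spec with
  | [] => 0
  | col_spec :: rest =>
    let a := PySem.List.pyGetD x (col_spec.natAbs : Int) 0
    let b := PySem.List.pyGetD y (col_spec.natAbs : Int) 0
    if a < b then (if col_spec < 0 then 1 else -1)
    else if b < a then (if col_spec < 0 then -1 else 1)
    else cmpCols rest x y

-- sorted(items, key=cmp_to_key(compare)) is Python's stable comparator sort; ported as the
-- prelude's stable insertion sort (insertBy with `compare x y < 0`), exact here because on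
-- Pre_ inputs `compare` is a strict weak order, for which the stable sort is unique.
def multisort_filter_alt (items : List (List Int)) (sort_spec : List Int) : List (List Int) :=
  if sort_spec = [] then items
  else
    items.foldl
      (fun acc x => PySem.List.insertBy (fun a b => decide (cmpCols sort_spec a b < 0)) x acc) []

-- ===== PRECONDITION & SPEC =====
-- Pre_ excludes exactly the inputs where Python raises IndexError: some abs(col_spec) out of range for some row.
def Pre_multisort_filter (items : List (List Int)) (sort_spec : List Int) : Prop :=
  ∀ c ∈ sort_spec, ∀ row ∈ items, c.natAbs < row.length
instance (items : List (List Int)) (sort_spec : List Int) : Decidable (Pre_multisort_filter items sort_spec) := by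
  unfold Pre_multisort_filter; infer_instance
def pvWitness_multisort_filter : List (List Int) × List Int := ([[1, 2, 3], [0, 2, 1], [5, 2, 1]], [2, -1])

def Spec_multisort_filter (items : List (List Int)) (sort_spec : List Int) (out : List (List Int)) : Prop := out = multisort_filter_alt items sort_spec
instance (items : List (List Int)) (sort_spec : List Int) (out : List (List Int)) : Decidable (Spec_multisort_filter items sort_spec out) := by unfold Spec_multisort_filter; infer_instance

-- ===== CLAIM (what is proved, stated in full; the proofs are below) =====
def Claim_equal_multisort_filter : Prop := ∀ (items : List (List Int)) (sort_spec : List Int), Dom_multisort_filter items sort_spec → Pre_multisort_filter items sort_spec → Spec_multisort_filter items sort_spec (multisort_filter items sort_spec)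

-- ===== LEMMAS AND PROOFS =====

-- generic stable insertion sort with a Bool "strictly-before" test
def isort {α : Type} (T : α → α → Bool) (l : List α) : List α :=
  l.foldl (fun acc x => PySem.List.insertBy T x acc) []

-- decorated strict order: lexicographic comparator, ties broken by the (original-position) tag
def plexT (spec : List Int) (a b : List Int × Nat) : Bool :=
  decide (cmpCols spec a.1 b.1 < 0) || (decide (cmpCols spec a.1 b.1 = 0) && decide (a.2 < b.2))

-- ---- facts about the comparator ----
theorem cmpCols_antisym (spec : List Int) (x y : List Int) : cmpCols spec y x = -cmpCols spec x y := by
  induction spec with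
  | nil => simp [cmpCols]
  | cons c rest ih => simp only [cmpCols]; split_ifs <;> omega

theorem cmpCols_zero_congr (spec : List Int) (x y : List Int) (h : cmpCols spec x y = 0)
    (z : List Int) : cmpCols spec x z = cmpCols spec y z := by
  induction spec with
  | nil => rfl
  | cons c rest ih =>
    simp only [cmpCols] at h ⊢
    split_ifs at h <;> split_ifs <;> omega

theorem cmpCols_trans_lt (spec : List Int) (x y z : List Int)
    (hxy : cmpCols spec x y < 0) (hyz : cmpCols spec y z < 0) : cmpCols spec x z < 0 := by
  induction spec with
  | nil => simp [cmpCols] at hxy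
  | cons c rest ih =>
    simp only [cmpCols] at hxy hyz ⊢
    split_ifs at hxy hyz ⊢ <;> omega

-- ---- facts about the decorated order ----
theorem plexT_asymm (spec : List Int) (a b : List Int × Nat) (h : plexT spec a b = true) :
    plexT spec b a = false := by
  have hs := cmpCols_antisym spec a.1 b.1
  simp only [plexT, Bool.or_eq_true, Bool.and_eq_true, decide_eq_true_eq] at h
  simp only [plexT, Bool.or_eq_false_iff, Bool.and_eq_false_iff, decide_eq_false_iff_not]
  omega

theorem plexT_trans (spec : List Int) (a b c : List Int × Nat)
    (hab : plexT spec a b = true) (hbc : plexT spec b c = true) : plexT spec a c = true := by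
  simp only [plexT, Bool.or_eq_true, Bool.and_eq_true, decide_eq_true_eq] at hab hbc ⊢
  rcases hab with h1 | ⟨h1, hi⟩ <;> rcases hbc with h2 | ⟨h2, hj⟩
  · exact Or.inl (cmpCols_trans_lt spec _ _ _ h1 h2)
  · left
    have := cmpCols_antisym spec b.1 c.1
    have h2' : cmpCols spec c.1 b.1 = 0 := by omega
    have := cmpCols_zero_congr spec c.1 b.1 h2' a.1
    have := cmpCols_antisym spec a.1 b.1
    have := cmpCols_antisym spec a.1 c.1
    omega
  · exact Or.inl (by rw [cmpCols_zero_congr spec a.1 b.1 h1 c.1]; exact h2)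
  · right
    constructor
    · rw [cmpCols_zero_congr spec a.1 b.1 h1 c.1]; exact h2
    · omega

theorem plexT_connex (spec : List Int) (a b : List Int × Nat) (h : a.2 ≠ b.2) :
    plexT spec a b = true ∨ plexT spec b a = true := by
  have hs := cmpCols_antisym spec a.1 b.1
  simp only [plexT, Bool.or_eq_true, Bool.and_eq_true, decide_eq_true_eq]
  omega

-- ---- generic insertion-sort lemmas ----
theorem insertBy_perm {α : Type} (T : α → α → Bool) (x : α) (l : List α) :
    (PySem.List.insertBy T x l).Perm (x :: l) := by
  induction l with
  | nil => simp [PySem.List.insertBy]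
  | cons y ys ih =>
    simp only [PySem.List.insertBy]
    split_ifs with h
    · exact List.Perm.refl _
    · exact (ih.cons y).trans (List.Perm.swap x y ys)

theorem foldl_insertBy_perm {α : Type} (T : α → α → Bool) (l acc : List α) :
    (l.foldl (fun acc x => PySem.List.insertBy T x acc) acc).Perm (acc ++ l) := by
  induction l generalizing acc with
  | nil => simp
  | cons x xs ih =>
    refine (ih (PySem.List.insertBy T x acc)).trans ?_
    exact ((insertBy_perm T x acc).append_right xs).trans List.perm_middle.symm

theorem isort_perm {α : Type} (T : α → α → Bool) (l : List α) : (isort T l).Perm l :=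
  foldl_insertBy_perm T l []

theorem insertBy_pairwise {α : Type} (T : α → α → Bool)
    (htrans : ∀ a b c, T a b = true → T b c = true → T a c = true)
    (x : α) (acc : List α) (hacc : acc.Pairwise (fun a b => T a b = true))
    (hcomp : ∀ y ∈ acc, T x y = true ∨ T y x = true) :
    (PySem.List.insertBy T x acc).Pairwise (fun a b => T a b = true) := by
  induction acc with
  | nil => simp [PySem.List.insertBy]
  | cons y ys ih =>
    rw [List.pairwise_cons] at hacc
    simp only [PySem.List.insertBy]
    split_ifs with h
    · refine List.pairwise_cons.2 ⟨?_, List.pairwise_cons.2 hacc⟩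
      intro z hz
      rcases List.mem_cons.1 hz with rfl | hz'
      · exact h
      · exact htrans x y z h (hacc.1 z hz')
    · refine List.pairwise_cons.2 ⟨?_, ih hacc.2 (fun z hz => hcomp z (by simp [hz]))⟩
      intro z hz
      have hz' := PySem.List.mem_insertBy T x ys (y := z) |>.1 hz
      rcases hz' with rfl | hz'
      · rcases hcomp y (by simp) with hy | hy
        · exact absurd hy (by simp [h])
        · exact hy
      · exact hacc.1 z hz'

theorem foldl_insertBy_pairwise {α : Type} (T : α → α → Bool)
    (htrans : ∀ a b c, T a b = true → T b c = true → T a c = true)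
    (l acc : List α) (hacc : acc.Pairwise (fun a b => T a b = true))
    (hla : ∀ x ∈ l, ∀ y ∈ acc, T x y = true ∨ T y x = true)
    (hl : l.Pairwise (fun a b => T a b = true ∨ T b a = true)) :
    (l.foldl (fun acc x => PySem.List.insertBy T x acc) acc).Pairwise (fun a b => T a b = true) := by
  induction l generalizing acc with
  | nil => exact hacc
  | cons x xs ih =>
    rw [List.pairwise_cons] at hl
    refine ih (PySem.List.insertBy T x acc)
      (insertBy_pairwise T htrans x acc hacc (hla x (by simp))) ?_ hl.2
    intro z hz y hy
    have hy' := PySem.List.mem_insertBy T x acc (y := y) |>.1 hy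
    rcases hy' with rfl | hy'
    · exact (hl.1 z hz).symm
    · exact hla z (by simp [hz]) y hy'

theorem isort_pairwise {α : Type} (T : α → α → Bool)
    (htrans : ∀ a b c, T a b = true → T b c = true → T a c = true)
    (l : List α) (hl : l.Pairwise (fun a b => T a b = true ∨ T b a = true)) :
    (isort T l).Pairwise (fun a b => T a b = true) :=
  foldl_insertBy_pairwise T htrans l [] (by simp) (by simp) hl

theorem isort_eq_of_perm {α : Type} (T : α → α → Bool)
    (htrans : ∀ a b c, T a b = true → T b c = true → T a c = true)
    (hasym : ∀ a b, T a b = true → T b a = false)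
    (l1 l2 : List α) (hp : l1.Perm l2)
    (h1 : l1.Pairwise (fun a b => T a b = true ∨ T b a = true))
    (h2 : l2.Pairwise (fun a b => T a b = true ∨ T b a = true)) :
    isort T l1 = isort T l2 := by
  exact List.Perm.eq_of_pairwise
    (fun a b _ _ hab hba => absurd hba (by simp [hasym a b hab]))
    (isort_pairwise T htrans l1 h1) (isort_pairwise T htrans l2 h2)
    ((isort_perm T l1).trans (hp.trans (isort_perm T l2).symm))

-- ---- projection lemmas: a decorated sort projects to the undecorated one ----
theorem insertBy_map_fst (lt2 : List Int → List Int → Bool)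
    (R : (List Int × Nat) → (List Int × Nat) → Bool)
    (x : List Int × Nat) (acc : List (List Int × Nat))
    (h : ∀ y ∈ acc, R x y = lt2 x.1 y.1) :
    (PySem.List.insertBy R x acc).map Prod.fst
      = PySem.List.insertBy lt2 x.1 (acc.map Prod.fst) := by
  induction acc with
  | nil => simp [PySem.List.insertBy]
  | cons y ys ih =>
    simp only [PySem.List.insertBy, List.map_cons]
    rw [h y (by simp)]
    split_ifs with hb
    · simp
    · simp only [List.map_cons]
      rw [ih (fun z hz => h z (by simp [hz]))]

theorem foldl_insertBy_map_fst (lt2 : List Int → List Int → Bool)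
    (R T : (List Int × Nat) → (List Int × Nat) → Bool)
    (hR : ∀ a b, T a b = false → R a b = lt2 a.1 b.1) :
    ∀ (zs acc : List (List Int × Nat)),
      (∀ x ∈ zs, ∀ y ∈ acc, T x y = false) →
      zs.Pairwise (fun a b => T b a = false) →
      (zs.foldl (fun acc x => PySem.List.insertBy R x acc) acc).map Prod.fst
        = (zs.map Prod.fst).foldl (fun acc x => PySem.List.insertBy lt2 x acc)
            (acc.map Prod.fst) := by
  intro zs
  induction zs with
  | nil => intro acc _ _; rfl
  | cons x xs ih =>
    intro acc hacc hzs
    rw [List.pairwise_cons] at hzs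
    simp only [List.foldl_cons, List.map_cons]
    rw [← insertBy_map_fst lt2 R x acc (fun y hy => hR x y (hacc x (by simp) y hy))]
    refine ih (PySem.List.insertBy R x acc) ?_ hzs.2
    intro z hz y hy
    have hy' := PySem.List.mem_insertBy R x acc (y := y) |>.1 hy
    rcases hy' with rfl | hy'
    · exact hzs.1 z hz
    · exact hacc z (by simp [hz]) y hy'

theorem isort_map_fst (lt2 : List Int → List Int → Bool)
    (R T : (List Int × Nat) → (List Int × Nat) → Bool)
    (hR : ∀ a b, T a b = false → R a b = lt2 a.1 b.1)
    (zs : List (List Int × Nat)) (hzs : zs.Pairwise (fun a b => T b a = false)) :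
    (isort R zs).map Prod.fst = isort lt2 (zs.map Prod.fst) :=
  foldl_insertBy_map_fst lt2 R T hR zs [] (by simp) hzs

-- ---- assembling ----
theorem zipIdx_snd_lt (l : List (List Int)) :
    l.zipIdx.Pairwise (fun a b => a.2 < b.2) := by
  rw [List.pairwise_iff_getElem]
  intro i j hi hj hij
  simp only [List.getElem_zipIdx]
  simpa using hij

theorem zipIdx_plex_pairwise (spec : List Int) (l : List (List Int)) :
    l.zipIdx.Pairwise (fun a b => plexT spec a b = true ∨ plexT spec b a = true) :=
  (zipIdx_snd_lt l).imp (fun h => plexT_connex spec _ _ (by omega))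

-- A's single pass "sorted by column c" is the undecorated insertion sort with the direction-aware test
def lt2c (c : Int) (x y : List Int) : Bool :=
  if c < 0 then decide (PySem.List.pyGetD y (c.natAbs : Int) 0 < PySem.List.pyGetD x (c.natAbs : Int) 0)
  else decide (PySem.List.pyGetD x (c.natAbs : Int) 0 < PySem.List.pyGetD y (c.natAbs : Int) 0)

theorem sorted_eq_isort (c : Int) (r : List (List Int)) :
    PySem.List.sorted r (fun x => PySem.List.pyGetD x (c.natAbs : Int) 0) (decide (c < 0))
      = isort (lt2c c) r := by
  by_cases hc : c < 0
  · have h : lt2c c = fun x y =>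
        decide (PySem.List.pyGetD y (c.natAbs : Int) 0 < PySem.List.pyGetD x (c.natAbs : Int) 0) := by
      funext x y; simp [lt2c, hc]
    rw [h]; simp [PySem.List.sorted, isort, hc]
  · have h : lt2c c = fun x y =>
        decide (PySem.List.pyGetD x (c.natAbs : Int) 0 < PySem.List.pyGetD y (c.natAbs : Int) 0) := by
      funext x y; simp [lt2c, hc]
    rw [h]; simp [PySem.List.sorted, isort, hc]

theorem plexT_nil (a b : List Int × Nat) : plexT [] a b = decide (a.2 < b.2) := by
  simp [plexT, cmpCols]

theorem plexT_cons_of_tail_false (c : Int) (spec : List Int) (a b : List Int × Nat)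
    (h : plexT spec a b = false) : plexT (c :: spec) a b = lt2c c a.1 b.1 := by
  simp only [plexT, Bool.or_eq_false_iff, Bool.and_eq_false_iff, decide_eq_false_iff_not] at h
  simp only [plexT, cmpCols, lt2c]
  split_ifs <;> simp_all <;> first | omega | (rw [Bool.eq_iff_iff]; simp; omega)

theorem isort_eq_self_of_pairwise {α : Type} (T : α → α → Bool) (l : List α)
    (hl : l.Pairwise (fun a b => T b a = false)) : isort T l = l := by
  suffices h : ∀ acc, (∀ x ∈ l, ∀ y ∈ acc, T x y = false) → l.foldl (fun acc x => PySem.List.insertBy T x acc) acc = acc ++ l by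
    simpa using h [] (by simp)
  induction l with
  | nil => simp
  | cons x xs ih =>
    intro acc hacc
    rw [List.pairwise_cons] at hl
    simp only [List.foldl_cons]
    rw [PySem.List.insertBy_of_forall_not_before T x acc (fun y hy => hacc x (by simp) y hy)]
    rw [ih hl.2 (acc ++ [x]) ?_]
    · simp
    · intro z hz y hy
      rcases List.mem_append.1 hy with hy | hy
      · exact hacc z (by simp [hz]) y hy
      · simp only [List.mem_singleton] at hy
        exact hy ▸ hl.1 z hz

-- the heart: A's foldr of stable single-column sorts = decorated lexicographic sort, projected
theorem main_lemma (spec : List Int) (items : List (List Int)) :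
    spec.foldr
        (fun c r => PySem.List.sorted r (fun x => PySem.List.pyGetD x (c.natAbs : Int) 0) (decide (c < 0)))
        items
      = (isort (plexT spec) items.zipIdx).map Prod.fst := by
  induction spec with
  | nil =>
    rw [isort_eq_self_of_pairwise (plexT []) items.zipIdx
      ((zipIdx_snd_lt items).imp (fun h => by rw [plexT_nil]; simpa using by omega))]
    simp
  | cons c spec ih =>
    simp only [List.foldr_cons]
    rw [ih, sorted_eq_isort]
    have hzs : (isort (plexT spec) items.zipIdx).Pairwise (fun a b => plexT spec b a = false) :=
      (isort_pairwise (plexT spec) (plexT_trans spec) items.zipIdx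
        (zipIdx_plex_pairwise spec items)).imp (fun h => plexT_asymm spec _ _ h)
    rw [← isort_map_fst (lt2c c) (plexT (c :: spec)) (plexT spec)
      (fun a b h => plexT_cons_of_tail_false c spec a b h) _ hzs]
    congr 1
    refine isort_eq_of_perm (plexT (c :: spec)) (plexT_trans (c :: spec))
      (plexT_asymm (c :: spec)) _ _ ((isort_perm (plexT spec) items.zipIdx)) ?_
      (zipIdx_plex_pairwise (c :: spec) items)
    have hsnd : (isort (plexT spec) items.zipIdx).Pairwise (fun a b => a.2 ≠ b.2) := by
      refine ((isort_perm (plexT spec) items.zipIdx).pairwise_iff ?_).2 ?_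
      · intro a b h; exact (h ·.symm)
      · exact (zipIdx_snd_lt items).imp (fun h => by omega)
    exact hsnd.imp (fun h => plexT_connex (c :: spec) _ _ h)

theorem alt_eq_proj (spec : List Int) (items : List (List Int)) :
    items.foldl (fun acc x => PySem.List.insertBy (fun a b => decide (cmpCols spec a b < 0)) x acc) []
      = (isort (plexT spec) items.zipIdx).map Prod.fst := by
  rw [isort_map_fst (fun x y => decide (cmpCols spec x y < 0)) (plexT spec)
    (fun a b => decide (a.2 < b.2))
    (fun a b h => by
      simp only [decide_eq_false_iff_not] at h
      simp only [plexT]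
      simp [h])
    items.zipIdx
    ((zipIdx_snd_lt items).imp (fun h => by simpa using by omega))]
  simp [isort]

-- ===== VERDICT (by name: the statement is the Claim_ definition above) =====
theorem multisort_filter_spec : Claim_equal_multisort_filter := by
  intro items sort_spec _ _
  unfold Spec_multisort_filter multisort_filter multisort_filter_alt
  by_cases hs : sort_spec = []
  · simp [hs]
  · simp only [hs, if_false]
    rw [List.foldl_reverse]
    have := main_lemma sort_spec items
    rw [show (sort_spec.foldr (fun c r => PySem.List.sorted r (fun x => PySem.List.pyGetD x (c.natAbs : Int) 0) (decide (c < 0))) items) = sort_spec.foldr (fun x y => PySem.List.sorted y (fun x_1 => PySem.List.pyGetD x_1 (x.natAbs : Int) 0) (decide (x < 0))) items from rfl] at this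
    rw [this, alt_eq_proj]
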